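-- pv_equiv track=rewrite | github.com/hyper-focused/video_optimizer | audit_orphans.py | _release_stem
-- ===== SOURCE A (Python) =====
-- ORIGINAL_TOKENS = (
--     ".HEVC", ".H.265", ".H265", ".x265", ".x.265",
--     ".AVC", ".H.264", ".H264", ".x264",
--     ".MPEG2", ".MPEG-2",
--     ".VC1", ".VC-1",
--     ".VP9",
-- )
--
-- def _release_stem(name: str) -> str:
--     """Strip codec/REENCODE markers so two siblings can be matched.
--
--     `Foo.HEVC.mkv`               → `Foo`
--     `Foo.HEVC+H.265.mkv`         → `Foo`
--     `Foo.AV1.REENCODE.mkv`       → `Foo`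
--     `Foo (2024).Remux-2160p.HEVC+H.265.mkv` → `Foo (2024).Remux-2160p`
--     """
--     upper = name.upper()
--     # Strip everything from the first codec marker onward.
--     earliest = len(name)
--     markers = (".AV1.REENCODE", *ORIGINAL_TOKENS)
--     for marker in markers:
--         idx = upper.find(marker.upper())
--         if idx != -1 and idx < earliest:
--             earliest = idx
--     return name[:earliest]
-- ===== SOURCE B (Python) =====
-- _MARKERS_UPPER = (
--     ".AV1.REENCODE",
--     ".HEVC", ".H.265", ".H265", ".X265", ".X.265",
--     ".AVC", ".H.264", ".H264", ".X264",
--     ".MPEG2", ".MPEG-2",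
--     ".VC1", ".VC-1",
--     ".VP9",
-- )
--
-- def _release_stem(name: str) -> str:
--     """Single left-to-right scan: cut at the first position where any marker starts."""
--     upper = name.upper()
--     for i in range(len(upper)):
--         if upper.startswith(_MARKERS_UPPER, i):
--             return name[:i]
--     return name
-- ===== Notes on version B (the rewrite author's own statement) =====
-- stated objective: idiomatic
-- what changed: Instead of 15 separate str.find scans whose results are minimised in a loop, B makes one left-to-right scan over positions of the uppercased name and cuts at the first position where any marker starts (str.startswith with a tuple of pre-uppercased markers).
import Mathlib
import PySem

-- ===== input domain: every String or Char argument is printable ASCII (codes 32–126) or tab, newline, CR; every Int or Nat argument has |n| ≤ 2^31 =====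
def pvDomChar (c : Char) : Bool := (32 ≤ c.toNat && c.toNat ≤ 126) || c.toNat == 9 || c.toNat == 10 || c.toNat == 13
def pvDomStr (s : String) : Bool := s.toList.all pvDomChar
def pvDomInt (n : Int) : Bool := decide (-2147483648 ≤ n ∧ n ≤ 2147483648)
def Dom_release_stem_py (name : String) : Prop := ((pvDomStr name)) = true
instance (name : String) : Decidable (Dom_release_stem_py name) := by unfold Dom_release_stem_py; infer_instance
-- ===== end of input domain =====

-- B replaces A's 15 separate str.find scans (one per marker) by a single left-to-right
-- scan over positions, cutting at the first position where any marker starts (objective: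
-- alternative/idiomatic single-pass formulation; not claimed faster).

-- ===== PORT A =====
def pvOriginalTokens : List String :=
  [".HEVC", ".H.265", ".H265", ".x265", ".x.265",
   ".AVC", ".H.264", ".H264", ".x264",
   ".MPEG2", ".MPEG-2",
   ".VC1", ".VC-1",
   ".VP9"]

def release_stem_py (name : String) : String :=
  let upper := PySem.Chars.upper name.toList
  let markers : List String := ".AV1.REENCODE" :: pvOriginalTokens
  let earliest : Int := markers.foldl
    (fun earliest marker =>
      let idx := PySem.Chars.find upper (PySem.Chars.upper marker.toList)
      if idx ≠ -1 ∧ idx < earliest then idx else earliest)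
    ((name.toList.length : Int))
  String.ofList (PySem.Chars.slice name.toList none (some earliest))

-- ===== PORT B =====
def pvMarkersUpper : List String :=
  [".AV1.REENCODE",
   ".HEVC", ".H.265", ".H265", ".X265", ".X.265",
   ".AVC", ".H.264", ".H264", ".X264",
   ".MPEG2", ".MPEG-2",
   ".VC1", ".VC-1",
   ".VP9"]

-- the `for i in range(len(upper))` loop: `up` is the suffix upper[i:]; returns the
-- cut position of the first `return name[:i]`, none = loop fell through
def pvScanB (up : List Char) (i : Nat) : Option Nat :=
  match up with
  | [] => none
  | _ :: rest =>
    if pvMarkersUpper.any (fun m => PySem.Chars.startswith up m.toList) then some i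
    else pvScanB rest (i + 1)

def release_stem_py_alt (name : String) : String :=
  let upper := PySem.Chars.upper name.toList
  match pvScanB upper 0 with
  | some i => String.ofList (name.toList.take i)
  | none => name

-- ===== PRECONDITION & SPEC =====
def Spec_release_stem_py (name : String) (out : String) : Prop := out = release_stem_py_alt name
instance (name : String) (out : String) : Decidable (Spec_release_stem_py name out) := by unfold Spec_release_stem_py; infer_instance

-- ===== CLAIM (what is proved, stated in full; the proofs are below) =====
def Claim_equal_release_stem_py : Prop := ∀ (name : String), Dom_release_stem_py name → Spec_release_stem_py name (release_stem_py name)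

-- ===== LEMMAS AND PROOFS =====

-- "some marker of B's list starts at position j of upper"
def pvHit (upper : List Char) (j : Nat) : Prop :=
  ∃ m ∈ pvMarkersUpper, m.toList <+: upper.drop j

-- B's uppercase marker list is A's marker list uppercased
theorem pvMarkers_upper_eq :
    ((".AV1.REENCODE" :: pvOriginalTokens).map (fun m => PySem.Chars.upper m.toList))
      = pvMarkersUpper.map (·.toList) := by decide

theorem pvHit_iff (upper : List Char) (j : Nat) :
    pvHit upper j ↔ ∃ m ∈ (".AV1.REENCODE" :: pvOriginalTokens),
      PySem.Chars.upper m.toList <+: upper.drop j := by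
  constructor
  · rintro ⟨m, hm, hpre⟩
    have : m.toList ∈ ((".AV1.REENCODE" :: pvOriginalTokens).map (fun m => PySem.Chars.upper m.toList)) := by
      rw [pvMarkers_upper_eq]; exact List.mem_map_of_mem hm
    rcases List.mem_map.1 this with ⟨m', hm', he⟩
    exact ⟨m', hm', he ▸ hpre⟩
  · rintro ⟨m, hm, hpre⟩
    have : PySem.Chars.upper m.toList ∈ pvMarkersUpper.map (·.toList) := by
      rw [← pvMarkers_upper_eq]; exact List.mem_map_of_mem hm
    rcases List.mem_map.1 this with ⟨m', hm', he⟩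
    exact ⟨m', hm', he ▸ hpre⟩

-- invariant of A's fold over the marker list
theorem pvFoldA (upper : List Char) (ms : List String) (P : Nat → Prop) (e : Int)
    (h1 : 0 ≤ e) (h2 : e ≤ upper.length)
    (h3 : ∀ j : Nat, (j : Int) < e → ¬ P j)
    (h4 : e < upper.length → P e.toNat) :
    let F := ms.foldl (fun earliest marker =>
      let idx := PySem.Chars.find upper (PySem.Chars.upper marker.toList)
      if idx ≠ -1 ∧ idx < earliest then idx else earliest) e
    0 ≤ F ∧ F ≤ upper.length ∧
    (∀ j : Nat, (j : Int) < F →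
      ¬ (P j ∨ ∃ m ∈ ms, PySem.Chars.upper m.toList <+: upper.drop j)) ∧
    (F < upper.length →
      (P F.toNat ∨ ∃ m ∈ ms, PySem.Chars.upper m.toList <+: upper.drop F.toNat)) := by
  induction ms generalizing e P with
  | nil =>
    refine ⟨h1, h2, ?_, ?_⟩
    · intro j hj; rintro (h | ⟨m, hm, _⟩)
      · exact h3 j hj h
      · simp at hm
    · intro h; exact Or.inl (h4 h)
  | cons m rest ih =>
    simp only [List.foldl_cons]
    set mu := PySem.Chars.upper m.toList with hmu
    set idx := PySem.Chars.find upper mu with hidx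
    by_cases hc : idx ≠ -1 ∧ idx < e
    · have hnn : 0 ≤ idx := by
        rw [hidx]; rw [PySem.Chars.find_nonneg_iff]
        exact (PySem.Chars.find_ne_neg_one_iff upper mu).1 hc.1
      have hspec := PySem.Chars.find_spec (s := upper) (sub := mu) hnn
      have hle : idx ≤ upper.length := PySem.Chars.find_le_length upper mu
      have step : (if idx ≠ -1 ∧ idx < e then idx else e) = idx := if_pos hc
      rw [step]
      have := ih (fun j => P j ∨ mu <+: upper.drop j) idx hnn hle
        (by
          intro j hj
          rintro (h | h)
          · exact h3 j (lt_trans hj hc.2) h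
          · exact hspec.2 j (by omega) h)
        (by intro _; exact Or.inr hspec.1)
      refine ⟨this.1, this.2.1, ?_, ?_⟩
      · intro j hj
        rintro (h | ⟨m', hm', hp⟩)
        · exact this.2.2.1 j hj (Or.inl (Or.inl h))
        · rcases List.mem_cons.1 hm' with rfl | hm'
          · exact this.2.2.1 j hj (Or.inl (Or.inr hp))
          · exact this.2.2.1 j hj (Or.inr ⟨m', hm', hp⟩)
      · intro hlt
        rcases this.2.2.2 hlt with (h | h) | ⟨m', hm', hp⟩
        · exact Or.inl h
        · exact Or.inr ⟨m, List.mem_cons_self .., h⟩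
        · exact Or.inr ⟨m', List.mem_cons_of_mem _ hm', hp⟩
    · have step : (if idx ≠ -1 ∧ idx < e then idx else e) = e := if_neg hc
      rw [step]
      have hmnot : ∀ j : Nat, (j : Int) < e → ¬ mu <+: upper.drop j := by
        intro j hj hp
        by_cases h1' : idx = -1
        · have : mu <:+: upper := by
            rw [← PySem.Chars.isIn_iff_infix,
              ← PySem.Chars.exists_prefix_drop_iff_isIn]
            exact ⟨j, hp⟩
          exact ((PySem.Chars.find_eq_neg_one_iff upper mu).1 h1') this
        · have he : e ≤ idx := by
            by_contra hlt; exact hc ⟨h1', by omega⟩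
          have hnn : 0 ≤ idx := by
            rw [hidx, PySem.Chars.find_nonneg_iff]
            exact (PySem.Chars.find_ne_neg_one_iff upper mu).1 h1'
          exact (PySem.Chars.find_spec (s := upper) (sub := mu) hnn).2 j (by omega) hp
      have := ih (fun j => P j ∨ mu <+: upper.drop j) e h1 h2
        (by
          intro j hj
          rintro (h | h)
          · exact h3 j hj h
          · exact hmnot j hj h)
        (by intro h; exact Or.inl (h4 h))
      refine ⟨this.1, this.2.1, ?_, ?_⟩
      · intro j hj
        rintro (h | ⟨m', hm', hp⟩)
        · exact this.2.2.1 j hj (Or.inl (Or.inl h))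
        · rcases List.mem_cons.1 hm' with rfl | hm'
          · exact this.2.2.1 j hj (Or.inl (Or.inr hp))
          · exact this.2.2.1 j hj (Or.inr ⟨m', hm', hp⟩)
      · intro hlt
        rcases this.2.2.2 hlt with (h | h) | ⟨m', hm', hp⟩
        · exact Or.inl h
        · exact Or.inr ⟨m, List.mem_cons_self .., h⟩
        · exact Or.inr ⟨m', List.mem_cons_of_mem _ hm', hp⟩

-- B's any-check at position i decides pvHit
theorem pvCheck_iff (upper : List Char) (i : Nat) :
    (pvMarkersUpper.any (fun m => PySem.Chars.startswith (upper.drop i) m.toList) = true)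
      ↔ pvHit upper i := by
  simp only [List.any_eq_true, pvHit, PySem.Chars.startswith_iff]

-- B's scan computes the minimal hit position characterised by (hmin, hmem)
theorem pvScanB_spec (upper : List Char) (F : Int)
    (hF0 : 0 ≤ F) (hFle : F ≤ upper.length)
    (hmin : ∀ j : Nat, (j : Int) < F → ¬ pvHit upper j)
    (hmem : F < upper.length → pvHit upper F.toNat) :
    ∀ (up : List Char) (i : Nat), up = upper.drop i → (i : Int) ≤ F →
      pvScanB up i = if F < upper.length then some F.toNat else none := by
  intro up
  induction up with
  | nil =>
    intro i hup hi
    have : upper.length ≤ i := by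
      by_contra h
      have := List.drop_eq_nil_iff.1 hup.symm; omega
    have hF : F = upper.length := by omega
    rw [pvScanB, if_neg (by omega)]
  | cons c rest ih =>
    intro i hup hi
    have hlen : i < upper.length := by
      by_contra h
      rw [List.drop_eq_nil_of_le (by omega)] at hup; exact List.cons_ne_nil _ _ hup
    rw [pvScanB]
    by_cases hchk : pvMarkersUpper.any (fun m => PySem.Chars.startswith (c :: rest) m.toList) = true
    · have hhit : pvHit upper i := by
        rw [← pvCheck_iff]; rw [← hup] at *; exact hchk
      have hFi : F = (i : Int) := by
        by_contra h
        exact hmin i (by omega) hhit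
      rw [if_pos hchk, if_pos (by omega)]
      congr 1; omega
    · have hnhit : ¬ pvHit upper i := by
        rw [← pvCheck_iff]; rw [← hup] at *; exact hchk
      have hFi : (i : Int) < F := by
        rcases lt_or_eq_of_le hi with h | h
        · exact h
        · exact absurd (by have := hmem (by omega); rwa [show F.toNat = i by omega] at this) hnhit
      rw [if_neg hchk]
      exact ih (i + 1) (by rw [← List.tail_drop, ← hup]; rfl) (by omega)

-- ===== VERDICT (by name: the statement is the Claim_ definition above) =====
theorem release_stem_py_spec : Claim_equal_release_stem_py := by
  intro name _
  show String.ofList (PySem.Chars.slice name.toList none (some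
      (List.foldl (fun earliest marker =>
          let idx := PySem.Chars.find (PySem.Chars.upper name.toList)
            (PySem.Chars.upper marker.toList)
          if idx ≠ -1 ∧ idx < earliest then idx else earliest)
        ((name.toList.length : Int)) (".AV1.REENCODE" :: pvOriginalTokens))))
    = (match pvScanB (PySem.Chars.upper name.toList) 0 with
       | some i => String.ofList (name.toList.take i)
       | none => name)
  set upper := PySem.Chars.upper name.toList with hupper
  have hulen : upper.length = name.toList.length := by
    rw [hupper]; simp [PySem.Chars.upper]
  have hfold := pvFoldA upper (".AV1.REENCODE" :: pvOriginalTokens) (fun _ => False)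
    ((name.toList.length : Int)) (by positivity) (by omega)
    (by intro j hj h; exact h) (by intro h; omega)
  set F := List.foldl (fun earliest marker =>
      let idx := PySem.Chars.find upper (PySem.Chars.upper marker.toList)
      if idx ≠ -1 ∧ idx < earliest then idx else earliest)
    ((name.toList.length : Int)) (".AV1.REENCODE" :: pvOriginalTokens) with hF
  obtain ⟨hF0, hFle, hmin, hmem⟩ := hfold
  have hmin' : ∀ j : Nat, (j : Int) < F → ¬ pvHit upper j := by
    intro j hj h
    exact hmin j hj (Or.inr ((pvHit_iff upper j).1 h))
  have hmem' : F < upper.length → pvHit upper F.toNat := by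
    intro h
    rcases hmem h with h' | h'
    · exact absurd h' (by simp)
    · exact (pvHit_iff upper F.toNat).2 h'
  have hscan := pvScanB_spec upper F hF0 (by omega) hmin' hmem' upper 0 (by simp) (by omega)
  have hslice : PySem.Chars.slice name.toList none (some F) = name.toList.take F.toNat := by
    rw [PySem.Chars.slice_eq_listSlice, PySem.List.slice_to]
    exact hF0
  rw [hscan, hslice]
  by_cases hlt : F < upper.length
  · rw [if_pos hlt]
  · rw [if_neg hlt]
    have hFeq : F = (name.toList.length : Int) := by omega
    rw [hFeq]
    have ht : name.toList.take ((name.toList.length : Int)).toNat = name.toList := by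
      simp
    rw [ht, String.ofList_toList]
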